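-- pv_equiv track=rewrite | github.com/TrapsterDK/datalogi-exercises | file.py | even_after_7_other_interpretation
-- ===== SOURCE A (Python) =====
-- def even_after_7_other_interpretation(v: list[int]) -> int:
--     """Compute the amount of even elements after the first element with the value 7.
--     >>> even_after_7_other_interpretation([5, 2, 7, 0, 1, 2, 4])
--     3
--     """
--
--     def _count_even(w: list) -> int:
--         """Count the amount of even numbers in a list.
--         >>> count_even([3, 5, 2, 4, 3, 6, 1])
--         3
--         """
--         if not w:
--             return 0
--         else:
--             return _count_even(w[1:]) + int(w[0] % 2 == 0)
--
--     if not v: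
--         return 0
--     if v[0] == 7:
--         return _count_even(v[1:])
--     else:
--         return even_after_7_other_interpretation(v[1:])
-- ===== SOURCE B (Python) =====
-- def even_after_7_other_interpretation(v: list[int]) -> int:
--     """Single left-to-right pass with a 'seen 7' flag instead of recursion."""
--     seen = False
--     count = 0
--     for x in v:
--         if seen and x % 2 == 0:
--             count += 1
--         elif not seen and x == 7:
--             seen = True
--     return count
-- ===== Notes on version B (the rewrite author's own statement) =====
-- stated objective: faster
-- what changed: Replaced the double recursion (search for 7, then a recursive even-counter, each slicing the list) by a single iterative pass maintaining a seen-7 flag and a counter.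
import Mathlib
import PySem

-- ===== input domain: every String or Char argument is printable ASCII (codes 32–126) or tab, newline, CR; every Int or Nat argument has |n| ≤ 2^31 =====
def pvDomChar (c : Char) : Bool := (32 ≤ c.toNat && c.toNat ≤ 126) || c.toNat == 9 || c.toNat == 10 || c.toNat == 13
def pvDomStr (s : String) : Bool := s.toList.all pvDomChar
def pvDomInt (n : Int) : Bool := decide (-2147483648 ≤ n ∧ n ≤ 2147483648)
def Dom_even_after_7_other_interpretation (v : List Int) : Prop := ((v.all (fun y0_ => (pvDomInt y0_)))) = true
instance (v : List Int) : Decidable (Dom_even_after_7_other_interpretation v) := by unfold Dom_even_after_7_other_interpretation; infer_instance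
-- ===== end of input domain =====

-- B replaces A's double recursion (with list slicing) by one iterative pass with a seen-7 flag; objective: faster (O(n) vs O(n^2)).

-- ===== PORT A =====
-- helper _count_even of A: recursive count of even elements
def pvCountEven : List Int → Int
  | [] => 0
  | x :: w => pvCountEven w + (if PySem.Int.mod x 2 == 0 then 1 else 0)

def even_after_7_other_interpretation : List Int → Int
  | [] => 0
  | x :: rest => if x == 7 then pvCountEven rest else even_after_7_other_interpretation rest

-- ===== PORT B =====
-- loop body of Source B's for-loop: one step on the (seen, count) state
def pvStep (st : Bool × Int) (x : Int) : Bool × Int :=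
  if st.1 && (PySem.Int.mod x 2 == 0) then (st.1, st.2 + 1)
  else if !st.1 && (x == 7) then (true, st.2)
  else st

-- single fold over the list threading (seen, count), mirroring Source B's for-loop
def even_after_7_other_interpretation_alt (v : List Int) : Int :=
  (v.foldl pvStep (false, 0)).2

-- ===== PRECONDITION & SPEC =====
def Spec_even_after_7_other_interpretation (v : List Int) (out : Int) : Prop := out = even_after_7_other_interpretation_alt v
instance (v : List Int) (out : Int) : Decidable (Spec_even_after_7_other_interpretation v out) := by unfold Spec_even_after_7_other_interpretation; infer_instance

-- ===== CLAIM (what is proved, stated in full; the proofs are below) =====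
def Claim_equal_even_after_7_other_interpretation : Prop := ∀ (v : List Int), Dom_even_after_7_other_interpretation v → Spec_even_after_7_other_interpretation v (even_after_7_other_interpretation v)

-- ===== LEMMAS AND PROOFS =====

-- after the flag is set, the fold just adds the even-count
theorem pvFold_true (w : List Int) (c : Int) :
    w.foldl pvStep (true, c) = (true, c + pvCountEven w) := by
  induction w generalizing c with
  | nil => simp [pvCountEven]
  | cons x w ih =>
    rw [List.foldl_cons]
    by_cases h : PySem.Int.mod x 2 == 0
    · rw [show pvStep (true, c) x = (true, c + 1) by unfold pvStep; rw [Bool.true_and, if_pos h], ih]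
      simp only [pvCountEven, if_pos h, Prod.mk.injEq, true_and]
      ring
    · rw [show pvStep (true, c) x = (true, c) by unfold pvStep; rw [Bool.true_and, if_neg h, Bool.not_true, Bool.false_and, if_neg (by decide : ¬ false = true)], ih]
      simp only [pvCountEven, if_neg h, Prod.mk.injEq, true_and]
      ring

-- before the flag is set, the fold's count component is c plus A's result
theorem pvFold_false (w : List Int) (c : Int) :
    (w.foldl pvStep (false, c)).2 = c + even_after_7_other_interpretation w := by
  induction w generalizing c with
  | nil => simp [even_after_7_other_interpretation]
  | cons x w ih =>
    rw [List.foldl_cons]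
    by_cases h : x == 7
    · rw [show pvStep (false, c) x = (true, c) by unfold pvStep; rw [Bool.false_and, if_neg (by decide : ¬ false = true), Bool.not_false, Bool.true_and, if_pos h], pvFold_true]
      simp only [even_after_7_other_interpretation, if_pos h]
    · rw [show pvStep (false, c) x = (false, c) by unfold pvStep; rw [Bool.false_and, if_neg (by decide : ¬ false = true), Bool.not_false, Bool.true_and, if_neg h], ih]
      simp only [even_after_7_other_interpretation, if_neg h]

-- ===== VERDICT (by name: the statement is the Claim_ definition above) =====
theorem even_after_7_other_interpretation_spec : Claim_equal_even_after_7_other_interpretation := by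
  intro v _
  unfold Spec_even_after_7_other_interpretation even_after_7_other_interpretation_alt
  rw [pvFold_false]
  simp
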